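-- pv_equiv track=rewrite | github.com/Brahamanbtp/KeyCrypt-Shield-X | tools/plugin_validator_cli.py | _normalize_distribution_name
-- ===== SOURCE A (Python) =====
-- def _normalize_distribution_name(name: str) -> str:
--     cleaned = name.strip().lower().replace(" ", "-")
--     cleaned = "".join(ch if ch.isalnum() or ch in "-_" else "-" for ch in cleaned)
--     cleaned = cleaned.strip("-_")
--     while "--" in cleaned:
--         cleaned = cleaned.replace("--", "-")
--     if not cleaned:
--         cleaned = "plugin"
--     if cleaned[0].isdigit():
--         cleaned = f"plugin-{cleaned}"
--     return cleaned
-- ===== SOURCE B (Python) =====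
-- def _normalize_distribution_name(name: str) -> str:
--     # single left-to-right pass: map each char to canonical form and collapse dash runs on the fly
--     out = []
--     for ch in name.strip().lower():
--         c = ch if (ch.isalnum() or ch in "-_") else "-"
--         if c != "-" or not out or out[-1] != "-":
--             out.append(c)
--     cleaned = "".join(out).strip("-_")
--     if not cleaned:
--         return "plugin"
--     if cleaned[0].isdigit():
--         return "plugin-" + cleaned
--     return cleaned
-- ===== Notes on version B (the rewrite author's own statement) =====
-- stated objective: simpler
-- what changed: single left-to-right scan that maps each character and collapses dash runs on the fly, replacing A's space-replace pass, join pass, and repeated whole-string double-dash replace loop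
import Mathlib
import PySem

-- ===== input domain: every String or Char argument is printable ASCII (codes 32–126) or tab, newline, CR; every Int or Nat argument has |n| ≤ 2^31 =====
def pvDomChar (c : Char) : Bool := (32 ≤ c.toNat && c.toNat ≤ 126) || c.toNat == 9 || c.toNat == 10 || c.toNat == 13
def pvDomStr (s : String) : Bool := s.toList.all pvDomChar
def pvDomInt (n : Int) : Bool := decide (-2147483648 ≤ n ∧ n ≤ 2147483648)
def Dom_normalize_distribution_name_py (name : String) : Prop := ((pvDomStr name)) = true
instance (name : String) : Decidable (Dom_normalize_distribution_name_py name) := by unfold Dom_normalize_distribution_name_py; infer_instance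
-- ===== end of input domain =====

-- B replaces A's multi-pass cleanup (space-replace pass, join pass, repeated double-dash replace loop)
-- by one left-to-right scan that maps each character and collapses dash runs on the fly; return values are equal.

-- ===== PORT A =====
-- A-side helpers: rep1 is one pass of `cleaned.replace("--", "-")` (proved below, needed for the
-- termination of the `while "--" in cleaned` loop); hasDD cs ↔ "--" occurs in cs.
def rep1 : List Char → List Char
  | [] => []
  | [c] => [c]
  | a :: b :: t => if a = '-' ∧ b = '-' then '-' :: rep1 t else a :: rep1 (b :: t)
  termination_by l => l.length

def hasDD : List Char → Bool
  | [] => false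
  | [_] => false
  | a :: b :: t => (decide (a = '-') && decide (b = '-')) || hasDD (b :: t)
  termination_by l => l.length

theorem rep1_len_le (cs : List Char) : (rep1 cs).length ≤ cs.length := by
  induction cs using rep1.induct with
  | case1 => simp [rep1]
  | case2 c => simp [rep1]
  | case3 a b t h ih => simp only [rep1, if_pos h, List.length_cons]; omega
  | case4 a b t h ih =>
      simp only [rep1, if_neg h, List.length_cons]
      simp only [List.length_cons] at ih; omega

theorem rep1_shrink (cs : List Char) (h : hasDD cs = true) : (rep1 cs).length < cs.length := by
  induction cs using rep1.induct with
  | case1 => simp [hasDD] at h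
  | case2 c => simp [hasDD] at h
  | case3 a b t hd ih =>
      have := rep1_len_le t
      simp only [rep1, if_pos hd, List.length_cons]; omega
  | case4 a b t hd ih =>
      simp only [hasDD, Bool.or_eq_true, Bool.and_eq_true, decide_eq_true_eq] at h
      rcases h with h | h
      · exact absurd ⟨h.1, h.2⟩ hd
      · have h2 := ih h
        simp only [rep1, if_neg hd, List.length_cons]
        simp only [List.length_cons] at h2; omega

theorem go_dd (fuel : Nat) : ∀ (l acc : List Char), l.length ≤ fuel →
    PySem.Chars.replace.go ['-', '-'] ['-'] fuel l acc = acc.reverse ++ rep1 l := by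
  induction fuel with
  | zero =>
      intro l acc h
      have : l = [] := List.eq_nil_of_length_eq_zero (Nat.le_zero.mp h)
      subst this; simp [PySem.Chars.replace.go, rep1]
  | succ n ih =>
      intro l acc h
      match l with
      | [] => simp [PySem.Chars.replace.go, rep1]
      | [c] =>
          have hp : List.isPrefixOf ['-', '-'] [c] = false := by
            simp [List.isPrefixOf]
          rw [PySem.Chars.replace.go, hp]
          simp only [Bool.false_eq_true, if_false]
          rw [ih [] (c :: acc) (by simp)]
          simp [rep1]
      | c :: b :: t' =>
          simp only [List.length_cons] at h
          by_cases hc : c = '-' ∧ b = '-'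
          · obtain ⟨hc1, hc2⟩ := hc; subst hc1; subst hc2
            have hp : List.isPrefixOf ['-', '-'] ('-' :: '-' :: t') = true := by
              simp [List.isPrefixOf]
            rw [PySem.Chars.replace.go, hp]
            simp only [if_true]
            rw [show List.drop (['-', '-'] : List Char).length ('-' :: '-' :: t') = t' from rfl]
            rw [ih t' _ (by omega)]
            simp [rep1]
          · have hp : List.isPrefixOf ['-', '-'] (c :: b :: t') = false := by
              cases hcb : ('-' == c) with
              | false => simp [List.isPrefixOf, hcb]
              | true =>
                  cases hbb : ('-' == b) with
                  | false => simp [List.isPrefixOf, hcb, hbb]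
                  | true =>
                      exact absurd ⟨(beq_iff_eq.mp hcb).symm, (beq_iff_eq.mp hbb).symm⟩ hc
            rw [PySem.Chars.replace.go, hp]
            simp only [Bool.false_eq_true, if_false]
            rw [ih (b :: t') (c :: acc) (by simp only [List.length_cons]; omega)]
            simp [rep1, hc]

theorem replace_dd_eq_rep1 (cs : List Char) :
    PySem.Chars.replace cs ['-', '-'] ['-'] = rep1 cs := by
  rw [PySem.Chars.replace]
  rw [show (['-', '-'] : List Char).isEmpty = false from rfl]
  simp only [Bool.false_eq_true, if_false]
  exact go_dd cs.length cs [] le_rfl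

theorem isIn_dd_iff (cs : List Char) : PySem.Chars.isIn ['-', '-'] cs = true ↔ hasDD cs = true := by
  rw [PySem.Chars.isIn_iff_infix]
  induction cs using hasDD.induct with
  | case1 => simp [hasDD]
  | case2 c =>
      simp only [hasDD]
      constructor
      · intro h; have := h.length_le; simp at this
      · simp
  | case3 a b t ih =>
      rw [List.infix_cons_iff]
      simp only [hasDD, Bool.or_eq_true, Bool.and_eq_true, decide_eq_true_eq]
      constructor
      · rintro (h | h)
        · left
          rcases h with ⟨r, hr⟩
          injection hr with h1 hr; injection hr with h2 _
          exact ⟨h1.symm, h2.symm⟩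
        · right; exact ih.mp h
      · rintro (⟨h1, h2⟩ | h)
        · left; subst h1; subst h2; exact ⟨t, rfl⟩
        · right; exact ih.mpr h

theorem replace_dd_shrink (cs : List Char) (h : PySem.Chars.isIn ['-', '-'] cs = true) :
    (PySem.Chars.replace cs ['-', '-'] ['-']).length < cs.length := by
  rw [replace_dd_eq_rep1]
  exact rep1_shrink cs ((isIn_dd_iff cs).mp h)

-- the `while "--" in cleaned: cleaned = cleaned.replace("--", "-")` loop of A
def collapseA (cs : List Char) : List Char :=
  if h : PySem.Chars.isIn ['-', '-'] cs = true then
    collapseA (PySem.Chars.replace cs ['-', '-'] ['-'])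
  else cs
  termination_by cs.length
  decreasing_by exact replace_dd_shrink cs h

def normalize_distribution_name_py (name : String) : String :=
  -- cleaned = name.strip().lower().replace(" ", "-")
  let cleaned1 := PySem.Chars.replace (PySem.Chars.lower (PySem.Chars.strip name.toList)) [' '] ['-']
  -- cleaned = "".join(ch if ch.isalnum() or ch in "-_" else "-" for ch in cleaned)  (char-wise map)
  let cleaned2 := cleaned1.map (fun ch => if PySem.Chars.isalnum ch || (ch == '-' || ch == '_') then ch else '-')
  -- cleaned = cleaned.strip("-_")
  let cleaned3 := PySem.Chars.stripChars cleaned2 ['-', '_']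
  -- while "--" in cleaned: cleaned = cleaned.replace("--", "-")
  let cleaned4 := collapseA cleaned3
  -- if not cleaned: cleaned = "plugin"
  let cleaned5 := if cleaned4.isEmpty then "plugin".toList else cleaned4
  -- if cleaned[0].isdigit(): cleaned = f"plugin-{cleaned}"   (cleaned is nonempty here, so [0] is the head)
  let cleaned6 := if PySem.Chars.isdigit (cleaned5.headD ' ') then "plugin-".toList ++ cleaned5 else cleaned5
  String.mk cleaned6

-- ===== PORT B =====
def normalize_distribution_name_py_alt (name : String) : String :=
  -- for ch in name.strip().lower(): append the canonical char unless it repeats a dash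
  let base := PySem.Chars.lower (PySem.Chars.strip name.toList)
  let out := base.foldl (fun out ch =>
    let c := if PySem.Chars.isalnum ch || (ch == '-' || ch == '_') then ch else '-'
    if !(c == '-') || out.isEmpty || !(PySem.List.pyGet? out (-1) == some '-') then out ++ [c]
    else out) []
  -- cleaned = "".join(out).strip("-_")
  let cleaned := PySem.Chars.stripChars out ['-', '_']
  if cleaned.isEmpty then "plugin"
  else if PySem.Chars.isdigit (cleaned.headD ' ') then String.mk ("plugin-".toList ++ cleaned)
  else String.mk cleaned

-- ===== PRECONDITION & SPEC =====
def Spec_normalize_distribution_name_py (name : String) (out : String) : Prop := out = normalize_distribution_name_py_alt name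
instance (name : String) (out : String) : Decidable (Spec_normalize_distribution_name_py name out) := by unfold Spec_normalize_distribution_name_py; infer_instance

-- ===== CLAIM (what is proved, stated in full; the proofs are below) =====
def Claim_equal_normalize_distribution_name_py : Prop := ∀ (name : String), Dom_normalize_distribution_name_py name → Spec_normalize_distribution_name_py name (normalize_distribution_name_py name)

-- ===== LEMMAS AND PROOFS =====

-- sqD b cs: collapse runs of '-' in one pass; b = "the previously emitted char is '-'"
def sqD : Bool → List Char → List Char
  | _, [] => []
  | b, c :: t => if c = '-' then (if b then sqD true t else '-' :: sqD true t) else c :: sqD false t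

-- the flag sqD carries after processing a chunk, starting from b
def flagAfter : Bool → List Char → Bool
  | b, [] => b
  | _, c :: t => flagAfter (decide (c = '-')) t

theorem sqD_head_ne (b : Bool) (c : Char) (t : List Char) (hc : ¬ c = '-') :
    sqD b (c :: t) = c :: sqD false t := by
  cases b <;> simp [sqD, hc]

theorem sqD_rep1 (cs : List Char) : ∀ b : Bool, sqD b (rep1 cs) = sqD b cs := by
  induction cs using rep1.induct with
  | case1 => intro b; simp [rep1]
  | case2 c => intro b; simp [rep1]
  | case3 a b t hd ih =>
      intro fl
      obtain ⟨h1, h2⟩ := hd; subst h1; subst h2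
      rw [show rep1 ('-' :: '-' :: t) = '-' :: rep1 t from by simp [rep1]]
      cases fl <;> simp [sqD, ih]
  | case4 a b t hd ih =>
      intro fl
      simp only [rep1, if_neg hd]
      by_cases ha : a = '-'
      · subst ha
        have hb : ¬ b = '-' := fun h => hd ⟨rfl, h⟩
        cases fl <;> simp [sqD, ih]
      · rw [sqD_head_ne fl a _ ha, sqD_head_ne fl a _ ha, ih false]

theorem sqD_noDD (cs : List Char) (h : hasDD cs = false) : sqD false cs = cs := by
  induction cs using hasDD.induct with
  | case1 => simp [sqD]
  | case2 c => by_cases hc : c = '-' <;> simp [sqD, hc]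
  | case3 a b t ih =>
      simp only [hasDD, Bool.or_eq_false_iff, Bool.and_eq_false_iff] at h
      obtain ⟨hab, ht⟩ := h
      by_cases ha : a = '-'
      · have hb : ¬ b = '-' := by
          rcases hab with h | h
          · exact absurd ha (by simpa using h)
          · simpa using h
        subst ha
        have := ih ht
        rw [sqD_head_ne false b t hb] at this
        simp [sqD, hb, this]
      · rw [sqD_head_ne false a _ ha, ih ht]

theorem collapseA_eq_sqD (cs : List Char) : collapseA cs = sqD false cs := by
  induction cs using collapseA.induct with
  | case1 cs h ih =>
      rw [collapseA, dif_pos h, ih, replace_dd_eq_rep1, sqD_rep1]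
  | case2 cs h =>
      rw [collapseA, dif_neg h]
      have hf : hasDD cs = false := by
        cases hh : hasDD cs
        · rfl
        · exact absurd ((isIn_dd_iff cs).mpr hh) h
      exact (sqD_noDD cs hf).symm

-- B's running fold equals sqD applied to the mapped characters
theorem fold_aux (g : Char → Char) (cs : List Char) : ∀ out : List Char,
    List.foldl (fun out ch =>
      if !(g ch == '-') || out.isEmpty || !(PySem.List.pyGet? out (-1) == some '-') then out ++ [g ch]
      else out) out cs
    = out ++ sqD (out.getLast? == some '-') (cs.map g) := by
  induction cs with
  | nil => intro out; simp [sqD]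
  | cons ch t ih =>
      intro out
      rw [List.foldl_cons, List.map_cons, ih]
      show (if (!(g ch == '-') || out.isEmpty || !(PySem.List.pyGet? out (-1) == some '-')) = true
              then out ++ [g ch] else out) ++
            sqD ((if (!(g ch == '-') || out.isEmpty || !(PySem.List.pyGet? out (-1) == some '-')) = true
              then out ++ [g ch] else out).getLast? == some '-') (t.map g)
          = out ++ sqD (out.getLast? == some '-') (g ch :: t.map g)
      by_cases hcd : g ch = '-'
      · by_cases hlast : out.getLast? = some '-'
        · have hne : out ≠ [] := by intro h; subst h; simp at hlast
          have hcond : (!(g ch == '-') || out.isEmpty || !(PySem.List.pyGet? out (-1) == some '-')) = false := by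
            simp [PySem.List.pyGet?_neg_one, hlast, hne, hcd]
          rw [hcond]
          simp only [Bool.false_eq_true, if_false]
          have hb : (out.getLast? == some '-') = true := by simp [hlast]
          rw [hb, hcd]
          have : sqD true ('-' :: t.map g) = sqD true (t.map g) := by simp [sqD]
          rw [this]
        · have hcond : (!(g ch == '-') || out.isEmpty || !(PySem.List.pyGet? out (-1) == some '-')) = true := by
            simp [PySem.List.pyGet?_neg_one]
            exact Or.inr hlast
          rw [hcond]
          simp only [if_true]
          have h1 : (out ++ [g ch]).getLast? = some (g ch) := List.getLast?_concat
          have h2 : (out.getLast? == some '-') = false := by simpa using hlast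
          rw [h1, h2, hcd]
          have h3 : ((some ('-' : Char)) == some '-') = true := by decide
          rw [h3]
          have : sqD false ('-' :: t.map g) = '-' :: sqD true (t.map g) := by simp [sqD]
          rw [this]
          simp
      · have hcond : (!(g ch == '-') || out.isEmpty || !(PySem.List.pyGet? out (-1) == some '-')) = true := by
          simp [hcd]
        rw [hcond]
        simp only [if_true]
        have h1 : (out ++ [g ch]).getLast? = some (g ch) := List.getLast?_concat
        rw [h1, sqD_head_ne _ (g ch) _ hcd]
        have h2 : ((some (g ch)) == some ('-' : Char)) = false := by simpa using hcd
        rw [h2]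
        simp

theorem fold_eq_sqD (cs : List Char) (out : List Char) :
    List.foldl (fun out ch =>
      let c := if PySem.Chars.isalnum ch || (ch == '-' || ch == '_') then ch else '-'
      if !(c == '-') || out.isEmpty || !(PySem.List.pyGet? out (-1) == some '-') then out ++ [c]
      else out) out cs
    = out ++ sqD (out.getLast? == some '-')
        (cs.map (fun ch => if PySem.Chars.isalnum ch || (ch == '-' || ch == '_') then ch else '-')) :=
  fold_aux (fun ch => if PySem.Chars.isalnum ch || (ch == '-' || ch == '_') then ch else '-') cs out

-- dropWhile over the strip set commutes with sqD
theorem dropWhile_sqD (cs : List Char) : ∀ b : Bool,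
    List.dropWhile (fun c => (['-', '_'] : List Char).contains c) (sqD b cs)
    = sqD false (List.dropWhile (fun c => (['-', '_'] : List Char).contains c) cs) := by
  induction cs with
  | nil => intro b; simp [sqD]
  | cons c t ih =>
      intro b
      by_cases hc : c = '-'
      · subst hc
        have hdrop : ∀ l : List Char,
            List.dropWhile (fun c => (['-', '_'] : List Char).contains c) ('-' :: l)
            = List.dropWhile (fun c => (['-', '_'] : List Char).contains c) l :=
          fun l => List.dropWhile_cons_of_pos (by decide)
        cases b
        · have hs : sqD false ('-' :: t) = '-' :: sqD true t := by simp [sqD]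
          rw [hs, hdrop, hdrop, ih true]
        · have hs : sqD true ('-' :: t) = sqD true t := by simp [sqD]
          rw [hs, hdrop, ih true]
      · rw [sqD_head_ne b c t hc]
        by_cases hpc : ((['-', '_'] : List Char).contains c) = true
        · rw [List.dropWhile_cons_of_pos hpc, List.dropWhile_cons_of_pos hpc, ih false]
        · rw [List.dropWhile_cons_of_neg (by simpa using hpc),
              List.dropWhile_cons_of_neg (by simpa using hpc), sqD_head_ne false c t hc]

theorem sqD_append (xs : List Char) : ∀ (b : Bool) (ys : List Char),
    sqD b (xs ++ ys) = sqD b xs ++ sqD (flagAfter b xs) ys := by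
  induction xs with
  | nil => intro b ys; simp [sqD, flagAfter]
  | cons c t ih =>
      intro b ys
      by_cases hc : c = '-'
      · subst hc
        cases b <;> simp [sqD, flagAfter, ih]
      · rw [List.cons_append, sqD_head_ne b c _ hc, sqD_head_ne b c _ hc, ih false]
        have : flagAfter b (c :: t) = flagAfter false t := by
          simp [flagAfter, hc]
        rw [this, List.cons_append]

theorem flagAfter_concat (ys : List Char) : ∀ (b : Bool) (c : Char),
    flagAfter b (ys ++ [c]) = decide (c = '-') := by
  induction ys with
  | nil => intro b c; simp [flagAfter]
  | cons d t ih => intro b c; simp only [List.cons_append, flagAfter]; exact ih _ c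

theorem sqD_reverse (cs : List Char) : sqD false cs.reverse = (sqD false cs).reverse := by
  induction cs with
  | nil => simp [sqD]
  | cons c t ih =>
      rw [List.reverse_cons, sqD_append t.reverse false [c]]
      by_cases hc : c = '-'
      · subst hc
        match t with
        | [] => simp [sqD, flagAfter]
        | d :: t' =>
            rw [List.reverse_cons, flagAfter_concat t'.reverse false d]
            by_cases hd : d = '-'
            · subst hd
              rw [show (decide (('-' : Char) = '-')) = true from rfl]
              rw [show (sqD true ['-'] : List Char) = [] from rfl]
              rw [List.append_nil, ← List.reverse_cons, ih]
              have hL : sqD false ('-' :: '-' :: t') = '-' :: sqD true t' := by simp [sqD]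
              have hR : sqD false ('-' :: t') = '-' :: sqD true t' := by simp [sqD]
              rw [hL, hR]
            · rw [show (decide (d = '-')) = (false : Bool) from by simp [hd]]
              rw [show (sqD false ['-'] : List Char) = ['-'] from rfl]
              rw [← List.reverse_cons, ih]
              have hL : sqD false ('-' :: d :: t') = '-' :: sqD false (d :: t') := by
                rw [show sqD false ('-' :: d :: t') = '-' :: sqD true (d :: t') from by simp [sqD]]
                rw [sqD_head_ne true d t' hd, sqD_head_ne false d t' hd]
              rw [hL]
              simp
      · rw [show sqD (flagAfter false t.reverse) [c] = [c] from by
            cases flagAfter false t.reverse <;> simp [sqD, hc]]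
        rw [ih, sqD_head_ne false c t hc]
        simp

-- stripping "-_" from both ends commutes with collapsing dash runs
theorem strip_comm (m : List Char) :
    PySem.Chars.stripChars (sqD false m) ['-', '_'] = sqD false (PySem.Chars.stripChars m ['-', '_']) := by
  simp only [PySem.Chars.stripChars]
  rw [dropWhile_sqD m false, ← sqD_reverse, dropWhile_sqD _ false, ← sqD_reverse]

-- one pass of replace(" ", "-") is a character map
theorem go_sp (fuel : Nat) : ∀ (l acc : List Char), l.length ≤ fuel →
    PySem.Chars.replace.go [' '] ['-'] fuel l acc
    = acc.reverse ++ l.map (fun c => if c = ' ' then '-' else c) := by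
  induction fuel with
  | zero =>
      intro l acc h
      have : l = [] := List.eq_nil_of_length_eq_zero (Nat.le_zero.mp h)
      subst this; simp [PySem.Chars.replace.go]
  | succ n ih =>
      intro l acc h
      match l with
      | [] => simp [PySem.Chars.replace.go]
      | c :: t =>
          simp only [List.length_cons] at h
          by_cases hc : c = ' '
          · subst hc
            have hp : List.isPrefixOf [' '] (' ' :: t) = true := by simp [List.isPrefixOf]
            rw [PySem.Chars.replace.go, hp]
            simp only [if_true]
            rw [show List.drop ([' '] : List Char).length (' ' :: t) = t from rfl]
            rw [ih t _ (by omega)]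
            simp
          · have hp : List.isPrefixOf [' '] (c :: t) = false := by
              simp [List.isPrefixOf]
              intro h'; exact hc h'.symm
            rw [PySem.Chars.replace.go, hp]
            simp only [Bool.false_eq_true, if_false]
            rw [ih t _ (by omega)]
            simp [hc]

theorem replace_space_eq_map (cs : List Char) :
    PySem.Chars.replace cs [' '] ['-'] = cs.map (fun c => if c = ' ' then '-' else c) := by
  rw [PySem.Chars.replace]
  rw [show ([' '] : List Char).isEmpty = false from rfl]
  simp only [Bool.false_eq_true, if_false]
  exact go_sp cs.length cs [] le_rfl

-- mapping spaces to '-' first does not change the canonicalising map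
theorem map_g_sp (l : List Char) :
    (l.map (fun c => if c = ' ' then '-' else c)).map
      (fun ch => if PySem.Chars.isalnum ch || (ch == '-' || ch == '_') then ch else '-')
    = l.map (fun ch => if PySem.Chars.isalnum ch || (ch == '-' || ch == '_') then ch else '-') := by
  rw [List.map_map]
  apply List.map_congr_left
  intro c _
  by_cases hc : c = ' '
  · subst hc; decide
  · simp [Function.comp, hc]

theorem ports_eq (name : String) :
    normalize_distribution_name_py name = normalize_distribution_name_py_alt name := by
  unfold normalize_distribution_name_py normalize_distribution_name_py_alt
  simp only [replace_space_eq_map, map_g_sp, collapseA_eq_sqD, fold_eq_sqD]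
  simp only [List.nil_append, List.getLast?_nil]
  rw [show ((none : Option Char) == some '-') = false from rfl]
  rw [strip_comm]
  set E := sqD false (PySem.Chars.stripChars
    ((PySem.Chars.lower (PySem.Chars.strip name.toList)).map
      (fun ch => if PySem.Chars.isalnum ch || (ch == '-' || ch == '_') then ch else '-')) ['-', '_']) with hE
  by_cases he : E.isEmpty = true
  · simp only [he, if_true]
    decide
  · have he' : E.isEmpty = false := by
      cases h : E.isEmpty
      · rfl
      · exact absurd h he
    simp only [he', Bool.false_eq_true, if_false]
    by_cases hd : PySem.Chars.isdigit (E.headD ' ') = true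
    · simp only [hd, if_true]
    · have hd' : PySem.Chars.isdigit (E.headD ' ') = false := by
        cases h : PySem.Chars.isdigit (E.headD ' ')
        · rfl
        · exact absurd h hd
      simp only [hd', Bool.false_eq_true, if_false]

-- ===== VERDICT (by name: the statement is the Claim_ definition above) =====
theorem normalize_distribution_name_py_spec : Claim_equal_normalize_distribution_name_py := by
  intro name _
  unfold Spec_normalize_distribution_name_py
  exact ports_eq name
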